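-- pv_equiv track=rewrite | github.com/JeJuBOO/Programmers_CodingTest | functio_development.py | solution
-- ===== SOURCE A (Python) =====
-- from math import ceil
--
-- def solution(progresses, speeds):
--     answer = [0]
--     pre_day = ceil((100-progresses[0])/speeds[0])
--     for i in range(len(progresses)):
--         day = ceil((100-progresses[i])/speeds[i])
--         if day <= pre_day:
--             answer[-1] += 1
--         else:
--             answer.append(1)
--             pre_day = day
--
--     return answer
-- ===== SOURCE B (Python) =====
-- from math import ceil
--
-- def solution(progresses, speeds):
--     days = [ceil((100 - p) / s) for p, s in zip(progresses, speeds)]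
--     release = [max(days[:i + 1]) for i in range(len(days))]
--     counts = {}
--     for v in release:
--         counts[v] = counts.get(v, 0) + 1
--     return list(counts.values())
-- ===== Notes on version B (the rewrite author's own statement) =====
-- stated objective: alternative
-- what changed: B computes each task's release day independently as the max over a prefix slice of the days list and then tallies group sizes with an insertion-ordered dict keyed by release day, replacing A's single greedy pass that increments the last slot of the answer; B trades A's O(n) scan for a clearer per-index definition at O(n^2) cost.
import Mathlib
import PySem

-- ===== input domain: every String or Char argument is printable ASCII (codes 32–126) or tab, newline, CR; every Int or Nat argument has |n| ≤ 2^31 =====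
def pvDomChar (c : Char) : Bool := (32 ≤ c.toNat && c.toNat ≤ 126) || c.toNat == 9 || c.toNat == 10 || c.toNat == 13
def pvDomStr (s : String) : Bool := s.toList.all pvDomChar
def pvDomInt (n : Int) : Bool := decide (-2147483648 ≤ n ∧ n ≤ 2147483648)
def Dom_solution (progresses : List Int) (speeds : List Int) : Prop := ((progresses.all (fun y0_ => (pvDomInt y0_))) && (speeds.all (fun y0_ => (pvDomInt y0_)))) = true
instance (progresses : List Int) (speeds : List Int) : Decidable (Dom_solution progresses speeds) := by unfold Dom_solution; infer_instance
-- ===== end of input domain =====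

-- B computes each task's release day independently as the max over a prefix slice and tallies
-- group sizes with an insertion-ordered dict, instead of A's greedy pass; objective: alternative.

-- ceil((100-p)/s) as exact integer ceiling -((-a)//s); on Dom (|ints| ≤ 2^31) Python's
-- float division followed by math.ceil is exact (|quotient·divisor| < 2^53), so this is faithful.
def ceilDiv (a b : Int) : Int := -(PySem.Int.floordiv (-a) b)

-- ===== PORT A =====
-- answer[-1] += 1
def incLast (xs : List Int) : List Int :=
  PySem.List.pySetD xs (-1) (PySem.List.pyGetD xs (-1) 0 + 1)

def solution (progresses : List Int) (speeds : List Int) : List Int :=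
  let answer : List Int := [0]
  let pre_day := ceilDiv (100 - PySem.List.pyGetD progresses 0 0) (PySem.List.pyGetD speeds 0 0)
  let st := (PySem.List.pyRange 0 progresses.length 1).foldl
    (fun (st : List Int × Int) i =>
      let day := ceilDiv (100 - PySem.List.pyGetD progresses i 0) (PySem.List.pyGetD speeds i 0)
      if day ≤ st.2 then (incLast st.1, st.2) else (st.1 ++ [1], day))
    (answer, pre_day)
  st.1

-- ===== PORT B =====
-- max(days[:i+1]); the slice is nonempty for every i produced by range(len(days)), so Python's
-- max never sees an empty list there and the .getD 0 default is never used.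
def prefixMax (days : List Int) (i : Int) : Int :=
  (PySem.List.max? (PySem.List.slice days none (some (i + 1))) (fun x => x)).getD 0

def solution_alt (progresses : List Int) (speeds : List Int) : List Int :=
  let days := (progresses.zip speeds).map (fun pr => ceilDiv (100 - pr.1) pr.2)
  let release := (PySem.List.pyRange 0 days.length 1).map (fun i => prefixMax days i)
  let counts := release.foldl
    (fun (d : PySem.Dict Int Int) v => d.insert v (d.getD v 0 + 1)) PySem.Dict.empty
  counts.values

-- ===== PRECONDITION & SPEC =====
-- Pre_: A raises IndexError on empty progresses or when speeds is shorter than progresses,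
-- and ZeroDivisionError when a speed used by the loop is 0; exactly those inputs are excluded.
def Pre_solution (progresses : List Int) (speeds : List Int) : Prop :=
  progresses ≠ [] ∧ progresses.length ≤ speeds.length ∧
    ∀ x ∈ speeds.take progresses.length, x ≠ 0
instance (progresses : List Int) (speeds : List Int) : Decidable (Pre_solution progresses speeds) := by unfold Pre_solution; infer_instance

def pvWitness_solution : List Int × List Int := ([93, 30, 55], [1, 30, 5])

def Spec_solution (progresses : List Int) (speeds : List Int) (out : List Int) : Prop := out = solution_alt progresses speeds
instance (progresses : List Int) (speeds : List Int) (out : List Int) : Decidable (Spec_solution progresses speeds out) := by unfold Spec_solution; infer_instance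

-- ===== CLAIM (what is proved, stated in full; the proofs are below) =====
def Claim_equal_solution : Prop := ∀ (progresses : List Int) (speeds : List Int), Dom_solution progresses speeds → Pre_solution progresses speeds → Spec_solution progresses speeds (solution progresses speeds)

-- ===== LEMMAS AND PROOFS =====

-- the list of running prefix maxima after a current maximum `cur`
def pmOf (cur : Int) : List Int → List Int
  | [] => []
  | d :: ds => max cur d :: pmOf (max cur d) ds

-- run-length encoding of a list, with current value `cur` counted `c` times so far
def rle (cur c : Int) : List Int → List Int
  | [] => [c]
  | v :: vs => if v = cur then rle cur (c + 1) vs else c :: rle v 1 vs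

lemma pm_ge : ∀ (ds : List Int) (cur : Int), ∀ x ∈ pmOf cur ds, cur ≤ x := by
  intro ds
  induction ds with
  | nil => intro cur x hx; simp [pmOf] at hx
  | cons d ds ih =>
    intro cur x hx
    simp only [pmOf, List.mem_cons] at hx
    rcases hx with h | h
    · omega
    · have := ih (max cur d) x h; omega

lemma pm_pairwise : ∀ (ds : List Int) (cur : Int), (pmOf cur ds).Pairwise (· ≤ ·) := by
  intro ds
  induction ds with
  | nil => intro cur; simp [pmOf]
  | cons d ds ih =>
    intro cur
    simp only [pmOf]
    exact List.pairwise_cons.mpr ⟨pm_ge ds (max cur d), ih (max cur d)⟩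

lemma incLast_append (ys : List Int) (a : Int) : incLast (ys ++ [a]) = ys ++ [a + 1] := by
  unfold incLast
  rw [PySem.List.pyGetD_neg_one_append_singleton]
  have hidx : PySem.List.pyIdx? (ys.length + 1) (-1) = some ys.length := by
    simp [PySem.List.pyIdx?]
  simp [PySem.List.pySetD, PySem.List.pySet?, hidx, List.set_append]

-- A's loop step on the current day value
def Astep (st : List Int × Int) (d : Int) : List Int × Int :=
  if d ≤ st.2 then (incLast st.1, st.2) else (st.1 ++ [1], d)

-- A's fold is the run-length encoding of the prefix-maxima sequence
lemma A_fold : ∀ (ds : List Int) (cur : Int) (acc : List Int) (c : Int),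
    (ds.foldl Astep (acc ++ [c], cur)).1 = acc ++ rle cur c (pmOf cur ds) := by
  intro ds
  induction ds with
  | nil => intro cur acc c; simp [pmOf, rle]
  | cons d ds ih =>
    intro cur acc c
    simp only [List.foldl_cons]
    by_cases hc : d ≤ cur
    · have hm : max cur d = cur := by omega
      have hA : Astep (acc ++ [c], cur) d = (acc ++ [c + 1], cur) := by
        unfold Astep; rw [if_pos hc, incLast_append]
      rw [hA, ih cur acc (c + 1)]
      simp [pmOf, rle, hm]
    · have hm : max cur d = d := by omega
      have hA : Astep (acc ++ [c], cur) d = ((acc ++ [c]) ++ [1], d) := by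
        unfold Astep; rw [if_neg hc]
      rw [hA, ih d (acc ++ [c]) 1]
      simp only [pmOf, rle, hm]
      rw [if_neg (by omega : ¬ d = cur)]
      simp

-- B's dict-counting fold over a ≤-sorted list is its run-length encoding
lemma dictfold : ∀ (t : List Int) (d : PySem.Dict Int Int) (P : List (Int × Int)) (cur c : Int),
    d.items = P ++ [(cur, c)] →
    (P.map Prod.fst).Pairwise (· < ·) →
    (∀ k ∈ P.map Prod.fst, k < cur) →
    (∀ x ∈ t, cur ≤ x) → t.Pairwise (· ≤ ·) →
    (t.foldl (fun (d : PySem.Dict Int Int) v => d.insert v (d.getD v 0 + 1)) d).values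
      = P.map Prod.snd ++ rle cur c t := by
  intro t
  induction t with
  | nil =>
    intro d P cur c hitems _ _ _ _
    simp only [List.foldl_nil, rle, PySem.Dict.values, hitems]
    simp
  | cons v vs ih =>
    intro d P cur c hitems hP hPcur hge hpw
    have hkeys : d.keys = P.map Prod.fst ++ [cur] := by
      simp only [PySem.Dict.keys, hitems]; simp
    have hnd : d.keys.Nodup := by
      rw [hkeys]
      apply List.Nodup.append
      · exact hP.nodup
      · simp
      · intro a ha hb
        simp only [List.mem_singleton] at hb
        have := hPcur a ha
        omega
    have hvge : cur ≤ v := hge v (List.mem_cons_self)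
    simp only [List.foldl_cons]
    by_cases hv : v = cur
    · subst hv
      have hcont : d.contains v = true := by
        rw [PySem.Dict.contains_iff_mem_keys, hkeys]; simp
      have hgd : d.getD v 0 = c :=
        PySem.Dict.getD_of_mem_items d (by rw [hitems]; simp) hnd 0
      have hitems' : (d.insert v (d.getD v 0 + 1)).items = P ++ [(v, c + 1)] := by
        rw [PySem.Dict.items_insert_of_contains d _ hcont, hitems]
        rw [List.map_append]
        congr 1
        · nth_rewrite 2 [← List.map_id P]
          apply List.map_congr_left
          intro p hp
          have hplt : p.1 < v := hPcur p.1 (List.mem_map.mpr ⟨p, hp, rfl⟩)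
          simp only [id]
          rw [if_neg (by simp only [beq_iff_eq]; omega)]
        · simp [hgd]
      rw [ih _ P v (c + 1) hitems' hP hPcur
            (fun x hx => hge x (List.mem_cons_of_mem _ hx)) hpw.of_cons]
      simp [rle]
    · have hlt : cur < v := lt_of_le_of_ne hvge (fun h => hv h.symm)
      have hncont : d.contains v = false := by
        rw [Bool.eq_false_iff]
        intro h
        have := (PySem.Dict.contains_iff_mem_keys d v).mp h
        rw [hkeys] at this
        simp only [List.mem_append, List.mem_singleton] at this
        rcases this with h' | h'
        · exact absurd (hPcur v h') (by omega)
        · exact hv h'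
      have hgd : d.getD v 0 = 0 := PySem.Dict.getD_of_not_contains d 0 hncont
      have hitems' : (d.insert v (d.getD v 0 + 1)).items = (P ++ [(cur, c)]) ++ [(v, 0 + 1)] := by
        rw [PySem.Dict.items_insert_of_not_contains d _ hncont, hitems, hgd]
      have hP' : ((P ++ [(cur, c)]).map Prod.fst).Pairwise (· < ·) := by
        rw [List.map_append, List.pairwise_append]
        refine ⟨hP, by simp, ?_⟩
        intro a ha b hb
        simp only [List.map_cons, List.map_nil, List.mem_singleton] at hb
        subst hb
        exact hPcur a ha
      have hPcur' : ∀ k ∈ (P ++ [(cur, c)]).map Prod.fst, k < v := by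
        intro k hk
        rw [List.map_append] at hk
        simp only [List.mem_append, List.map_cons, List.map_nil, List.mem_singleton] at hk
        rcases hk with h' | h'
        · have := hPcur k h'; omega
        · omega
      have hge' : ∀ x ∈ vs, v ≤ x := fun x hx => (List.pairwise_cons.mp hpw).1 x hx
      rw [ih _ (P ++ [(cur, c)]) v (0 + 1) hitems' hP' hPcur' hge' hpw.of_cons]
      simp only [rle, if_neg hv]
      simp

-- the per-index slice-maxima list equals the cons'ed running maxima
lemma release_eq : ∀ (rest : List Int) (cur : Int),
    (List.range (rest.length + 1)).map
        (fun k => (PySem.List.max? ((cur :: rest).take (k + 1)) (fun x => x)).getD 0)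
      = cur :: pmOf cur rest := by
  intro rest
  induction rest with
  | nil =>
    intro cur
    simp [List.range_succ, PySem.List.max?_id_cons, pmOf]
  | cons d ds ih =>
    intro cur
    rw [List.range_succ_eq_map]
    simp only [List.map_cons, List.map_map, List.length_cons]
    have htail : ∀ k, k ∈ List.range (ds.length + 1) →
        ((fun k => (PySem.List.max? ((cur :: d :: ds).take (k + 1)) (fun x => x)).getD 0)
            ∘ Nat.succ) k
          = (fun k => (PySem.List.max? ((max cur d :: ds).take (k + 1)) (fun x => x)).getD 0) k := by
      intro k _
      simp only [Function.comp]
      rw [show Nat.succ k + 1 = k + 1 + 1 from rfl]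
      rw [List.take_succ_cons, List.take_succ_cons, List.take_succ_cons,
          PySem.List.max?_id_cons, PySem.List.max?_id_cons]
      simp
    rw [List.map_congr_left htail, ih (max cur d)]
    simp only [pmOf]
    congr 1

-- ===== VERDICT (by name: the statement is the Claim_ definition above) =====
theorem solution_spec : Claim_equal_solution := by
  intro p s hdom hpre
  obtain ⟨hne, hlen, -⟩ := hpre
  unfold Spec_solution solution solution_alt
  simp only []
  set days := (p.zip s).map (fun pr => ceilDiv (100 - pr.1) pr.2) with hdays
  have hlen' : days.length = p.length := by
    simp [hdays]
    omega
  have hx : ∀ x : Int, 0 ≤ x → x < (p.length : Int) →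
      PySem.List.pyGetD days x 0
        = ceilDiv (100 - PySem.List.pyGetD p x 0) (PySem.List.pyGetD s x 0) := by
    intro x h0 h1
    have hxs : x < (s.length : Int) := by
      have : (p.length : Int) ≤ (s.length : Int) := by exact_mod_cast hlen
      omega
    rw [PySem.List.pyGetD_eq_getElem days 0 h0 (by rw [hlen']; exact h1),
        PySem.List.pyGetD_eq_getElem p 0 h0 h1,
        PySem.List.pyGetD_eq_getElem s 0 h0 hxs]
    simp [hdays, List.getElem_zip]
  have hcong : (PySem.List.pyRange 0 (p.length : Int) 1).foldl
      (fun (st : List Int × Int) i =>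
        let day := ceilDiv (100 - PySem.List.pyGetD p i 0) (PySem.List.pyGetD s i 0)
        if day ≤ st.2 then (incLast st.1, st.2) else (st.1 ++ [1], day))
      ([0], ceilDiv (100 - PySem.List.pyGetD p 0 0) (PySem.List.pyGetD s 0 0))
      = (PySem.List.pyRange 0 (p.length : Int) 1).foldl
        (fun (st : List Int × Int) i => Astep st (PySem.List.pyGetD days i 0))
        ([0], ceilDiv (100 - PySem.List.pyGetD p 0 0) (PySem.List.pyGetD s 0 0)) := by
    apply PySem.List.foldl_congr_mem
    intro acc x hxmem
    obtain ⟨hx0, hx1⟩ := (PySem.List.mem_pyRange_one).mp hxmem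
    simp only [Astep]
    rw [hx x hx0 hx1]
  have hpre0 : ceilDiv (100 - PySem.List.pyGetD p 0 0) (PySem.List.pyGetD s 0 0)
      = PySem.List.pyGetD days 0 0 := by
    rw [hx 0 (le_refl 0) (by exact_mod_cast List.length_pos_iff.mpr hne)]
  rw [hcong, hpre0]
  rw [show ((p.length : Int)) = ((days.length : Int)) by exact_mod_cast hlen'.symm]
  rw [PySem.List.foldl_pyRange_zero_pyGetD' days 0 Astep _]
  obtain ⟨d0, rest, hcons⟩ : ∃ d0 rest, days = d0 :: rest := by
    cases hd : days with
    | nil => exfalso; rw [hd] at hlen'; simp at hlen'; exact hne (List.length_eq_zero_iff.mp hlen'.symm)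
    | cons a b => exact ⟨a, b, rfl⟩
  -- A side: first step, then A_fold
  have hget0 : PySem.List.pyGetD days 0 0 = d0 := by
    rw [hcons]; exact PySem.List.pyGetD_zero_cons _ _ _
  have hA : (days.foldl Astep ([0], PySem.List.pyGetD days 0 0)).1
      = rle d0 1 (pmOf d0 rest) := by
    rw [hget0, hcons, List.foldl_cons]
    have hstep : Astep ([0], d0) d0 = ([] ++ [1], d0) := by
      unfold Astep
      rw [if_pos (le_refl d0)]
      have := incLast_append [] 0
      simp at this
      simp [this]
    rw [hstep, A_fold rest d0 [] 1]
    simp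
  rw [hA]
  -- B side: release list is cons'ed running maxima, then dictfold
  have hrel : (PySem.List.pyRange 0 (days.length : Int) 1).map (fun i => prefixMax days i)
      = d0 :: pmOf d0 rest := by
    have hpm : ∀ (k : Nat), prefixMax days ((0 : Int) + (k : Int))
        = (PySem.List.max? (days.take (k + 1)) (fun x => x)).getD 0 := by
      intro k
      unfold prefixMax
      have h1 : ((0 : Int) + (k : Int) + 1) = ((k + 1 : Nat) : Int) := by push_cast; ring
      rw [h1, PySem.List.slice_to_natCast]
    rw [PySem.List.pyRange_one]
    simp only [sub_zero, Int.toNat_natCast, List.map_map]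
    have hcongr : List.map ((fun i => prefixMax days i) ∘ fun (k : Nat) => (0 : Int) + (k : Int))
          (List.range days.length)
        = List.map (fun k => (PySem.List.max? (days.take (k + 1)) (fun x => x)).getD 0)
          (List.range days.length) :=
      List.map_congr_left (fun k _ => hpm k)
    rw [hcongr, hcons]
    simp only [List.length_cons]
    exact release_eq rest d0
  rw [hrel]
  simp only [List.foldl_cons]
  have hitems0 : ((PySem.Dict.empty : PySem.Dict Int Int).insert d0
      ((PySem.Dict.empty : PySem.Dict Int Int).getD d0 0 + 1)).items = [] ++ [(d0, 0 + 1)] := by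
    rw [PySem.Dict.items_insert_of_not_contains _ _ (PySem.Dict.contains_empty d0),
        PySem.Dict.getD_empty]
    rfl
  rw [dictfold (pmOf d0 rest) _ [] d0 (0 + 1) hitems0 (by simp) (by simp)
      (pm_ge rest d0) (pm_pairwise rest d0)]
  simp
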